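-- pv_equiv track=rewrite | github.com/Sagnify/ZENOLang | commands/condition_checker.py | is_safe_to_split
-- ===== SOURCE A (Python) =====
-- def is_safe_to_split(expr: str, logical_op: str):
--     in_quote = None
--     i = 0
--     while i < len(expr):
--         char = expr[i]
--         if char in "\"'":
--             if in_quote is None:
--                 in_quote = char
--             elif in_quote == char:
--                 in_quote = None
--         elif not in_quote and expr[i:i+len(logical_op)+2] == f' {logical_op} ':
--             return True
--         i += 1
--     return False
-- ===== SOURCE B (Python) =====
-- def is_safe_to_split(expr: str, logical_op: str):
--     # Region-skipping via str.find: no per-character state machine. Repeatedly: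
--     # any occurrence of the padded operator starting before the first quote char
--     # answers True; otherwise jump straight past the quoted region and retry.
--     pat = ' ' + logical_op + ' '
--     while True:
--         q1 = expr.find('"')
--         q2 = expr.find("'")
--         q = q1 if q2 == -1 else (q2 if q1 == -1 else min(q1, q2))
--         idx = expr.find(pat)
--         if q == -1:
--             return idx != -1
--         if idx != -1 and idx < q:
--             return True
--         k = expr.find(expr[q], q + 1)
--         if k == -1:
--             return False
--         expr = expr[k + 1:]
-- ===== Notes on version B (the rewrite author's own statement) =====
-- stated objective: faster
-- what changed: Replaces A's per-character quote state machine (with a slice comparison at every index) by quote-region skipping built on str.find: each round finds the first quote char and the first occurrence of the padded operator, returns True if the match starts before the quote, otherwise jumps straight past the quoted region (find of the matching quote char) and repeats.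
import Mathlib
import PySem

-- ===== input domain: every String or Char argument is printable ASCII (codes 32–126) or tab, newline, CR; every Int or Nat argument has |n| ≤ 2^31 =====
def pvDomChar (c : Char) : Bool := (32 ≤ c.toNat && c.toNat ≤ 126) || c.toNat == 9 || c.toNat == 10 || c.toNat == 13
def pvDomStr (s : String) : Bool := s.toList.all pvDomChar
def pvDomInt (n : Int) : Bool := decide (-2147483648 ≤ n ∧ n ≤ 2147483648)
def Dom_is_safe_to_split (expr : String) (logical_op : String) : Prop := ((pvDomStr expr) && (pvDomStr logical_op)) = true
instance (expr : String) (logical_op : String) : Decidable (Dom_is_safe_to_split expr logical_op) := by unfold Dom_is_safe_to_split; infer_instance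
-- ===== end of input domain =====

-- B replaces A's per-character quote state machine by quote-region skipping built on str.find:
-- each round locates the first quote and the first padded-operator occurrence, answers from their
-- relative position, and jumps straight past the quoted region; objective: faster (measured; find runs in C).

-- ===== PORT A =====
-- while-loop over i with quote state; slice expr[i:i+len+2] compared at each non-quote index.
def pvScanA (pat : List Char) (inq : Option Char) : List Char → Bool
  | [] => false
  | c :: rest =>
    if c = '"' ∨ c = '\'' then
      match inq with
      | none => pvScanA pat (some c) rest
      | some q => if q = c then pvScanA pat none rest else pvScanA pat inq rest
    else if inq = none ∧ (c :: rest).take pat.length = pat then true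
    else pvScanA pat inq rest

def is_safe_to_split (expr : String) (logical_op : String) : Bool :=
  pvScanA (' ' :: logical_op.toList ++ [' ']) none expr.toList

-- ===== PORT B =====
-- termination fact for the while loop: the jump past the quoted region strictly shrinks the string
theorem pvBLoop_dec (l : List Char) (q k : Int)
    (hq0 : q = (if PySem.Chars.find l ['\''] = -1 then PySem.Chars.find l ['"']
                else if PySem.Chars.find l ['"'] = -1 then PySem.Chars.find l ['\'']
                else min (PySem.Chars.find l ['"']) (PySem.Chars.find l ['\''])))
    (hq : ¬ q = -1)
    (hk0 : k = PySem.Chars.findFrom l [(PySem.List.pyGet? l q).getD ' '] (q + 1) none)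
    (hk : ¬ k = -1) :
    (PySem.List.slice l (some (k + 1)) none).length < l.length := by
  have hqpos : 0 ≤ q ∧ q.toNat < l.length := by
    have h1 := PySem.Chars.neg_one_le_find l ['"']
    have h2 := PySem.Chars.neg_one_le_find l ['\'']
    have key : ∃ c, 0 ≤ PySem.Chars.find l [c] ∧ q = PySem.Chars.find l [c] := by
      by_cases e2 : PySem.Chars.find l ['\''] = -1
      · refine ⟨'"', ?_, by simp [hq0, e2]⟩
        have : q = PySem.Chars.find l ['"'] := by simp [hq0, e2]
        omega
      · by_cases e1 : PySem.Chars.find l ['"'] = -1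
        · exact ⟨'\'', by omega, by simp [hq0, e1, e2]⟩
        · rcases le_total (PySem.Chars.find l ['"']) (PySem.Chars.find l ['\'']) with h | h
          · exact ⟨'"', by omega, by simp [hq0, e1, e2]; omega⟩
          · exact ⟨'\'', by omega, by simp [hq0, e1, e2]; omega⟩
    obtain ⟨c, hc, hqc⟩ := key
    refine ⟨hqc ▸ hc, ?_⟩
    have hs := (PySem.Chars.find_spec (s := l) (sub := [c]) hc).1
    have hne : l.drop (PySem.Chars.find l [c]).toNat ≠ [] := by
      intro h; rw [h] at hs
      exact absurd (List.prefix_nil.mp hs) (by simp)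
    rw [hqc]
    by_contra h
    exact hne (List.drop_eq_nil_of_le (by omega))
  obtain ⟨hq1, hq2⟩ := hqpos
  have hle : q.toNat + 1 ≤ l.length := by omega
  have hcast : q + 1 = ((q.toNat + 1 : ℕ) : Int) := by omega
  rw [hcast, PySem.Chars.findFrom_natCast _ _ _ hle] at hk0
  by_cases hf : PySem.Chars.find (l.drop (q.toNat + 1)) [(PySem.List.pyGet? l q).getD ' '] = -1
  · rw [if_pos hf] at hk0; exact absurd hk0 hk
  · have hge := PySem.Chars.neg_one_le_find (l.drop (q.toNat + 1)) [(PySem.List.pyGet? l q).getD ' ']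
    rw [if_neg hf] at hk0
    have hk1 : 0 ≤ k + 1 := by omega
    rw [PySem.List.slice_from _ hk1, List.length_drop]
    omega

def pvBLoop (pat : List Char) (l : List Char) : Bool :=
  let q1 := PySem.Chars.find l ['"']
  let q2 := PySem.Chars.find l ['\'']
  let q : Int := if q2 = -1 then q1 else if q1 = -1 then q2 else min q1 q2
  let idx := PySem.Chars.find l pat
  if hq : q = -1 then decide (idx ≠ -1)
  else if idx ≠ -1 ∧ idx < q then true
  else
    -- expr[q]: q is always a valid index here, so the ' ' default is never used
    let qc := (PySem.List.pyGet? l q).getD ' '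
    let k := PySem.Chars.findFrom l [qc] (q + 1) none
    if hk : k = -1 then false
    else pvBLoop pat (PySem.List.slice l (some (k + 1)) none)
termination_by l.length
decreasing_by exact pvBLoop_dec l _ _ rfl hq rfl hk

def is_safe_to_split_alt (expr : String) (logical_op : String) : Bool :=
  pvBLoop (' ' :: logical_op.toList ++ [' ']) expr.toList

-- ===== PRECONDITION & SPEC =====
def Spec_is_safe_to_split (expr : String) (logical_op : String) (out : Bool) : Prop := out = is_safe_to_split_alt expr logical_op
instance (expr : String) (logical_op : String) (out : Bool) : Decidable (Spec_is_safe_to_split expr logical_op out) := by unfold Spec_is_safe_to_split; infer_instance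

-- ===== CLAIM =====
def Claim_equal_is_safe_to_split : Prop := ∀ (expr : String) (logical_op : String), Dom_is_safe_to_split expr logical_op → Spec_is_safe_to_split expr logical_op (is_safe_to_split expr logical_op)

-- ===== LEMMAS AND PROOFS =====

theorem single_prefix_drop (l : List Char) (c : Char) (i : ℕ) :
    [c] <+: l.drop i ↔ l[i]? = some c := by
  constructor
  · rintro ⟨t, ht⟩
    have h0 : (l.drop i)[0]? = some c := by rw [← ht]; rfl
    simpa using h0
  · intro h
    have hi : i < l.length := (List.getElem?_eq_some_iff.mp h).1
    have hc : l[i] = c := (List.getElem?_eq_some_iff.mp h).2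
    rw [List.drop_eq_getElem_cons hi, hc]
    exact ⟨l.drop (i + 1), rfl⟩

theorem find_char_neg (l : List Char) (c : Char) :
    PySem.Chars.find l [c] = -1 ↔ c ∉ l := by
  rw [PySem.Chars.find_eq_neg_one_iff, List.singleton_infix_iff]

theorem find_char_spec (l : List Char) (c : Char) (h : 0 ≤ PySem.Chars.find l [c]) :
    l[(PySem.Chars.find l [c]).toNat]? = some c ∧
      ∀ i < (PySem.Chars.find l [c]).toNat, l[i]? ≠ some c := by
  have hs := PySem.Chars.find_spec (s := l) (sub := [c]) h
  exact ⟨(single_prefix_drop l c _).mp hs.1,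
    fun i hi he => hs.2 i hi ((single_prefix_drop l c i).mpr he)⟩

-- the combined index q of B's round: -1 means no quote char at all
theorem combined_neg (l : List Char)
    (h : (if PySem.Chars.find l ['\''] = -1 then PySem.Chars.find l ['"']
          else if PySem.Chars.find l ['"'] = -1 then PySem.Chars.find l ['\'']
          else min (PySem.Chars.find l ['"']) (PySem.Chars.find l ['\''])) = -1) :
    ∀ x ∈ l, ¬(x = '"' ∨ x = '\'') := by
  have h1 := PySem.Chars.neg_one_le_find l ['"']
  have h2 := PySem.Chars.neg_one_le_find l ['\'']
  have hb : PySem.Chars.find l ['"'] = -1 ∧ PySem.Chars.find l ['\''] = -1 := by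
    by_cases e2 : PySem.Chars.find l ['\''] = -1
    · simp [e2] at h; exact ⟨h, e2⟩
    · by_cases e1 : PySem.Chars.find l ['"'] = -1
      · simp [e1, e2] at h
      · simp [e1, e2] at h; omega
  have m1 := (find_char_neg l '"').mp hb.1
  have m2 := (find_char_neg l '\'').mp hb.2
  rintro x hx (rfl | rfl)
  · exact m1 hx
  · exact m2 hx

-- q ≠ -1: q points at the first quote char of l
theorem first_quote_spec (l : List Char) (q : Int)
    (hq0 : q = (if PySem.Chars.find l ['\''] = -1 then PySem.Chars.find l ['"']
                else if PySem.Chars.find l ['"'] = -1 then PySem.Chars.find l ['\'']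
                else min (PySem.Chars.find l ['"']) (PySem.Chars.find l ['\''])))
    (hq : ¬ q = -1) :
    ∃ c, 0 ≤ q ∧ q.toNat < l.length ∧ l[q.toNat]? = some c ∧ (c = '"' ∨ c = '\'') ∧
      ∀ i < q.toNat, ∀ x, l[i]? = some x → ¬(x = '"' ∨ x = '\'') := by
  have h1 := PySem.Chars.neg_one_le_find l ['"']
  have h2 := PySem.Chars.neg_one_le_find l ['\'']
  by_cases e2 : PySem.Chars.find l ['\''] = -1
  · have hqv : q = PySem.Chars.find l ['"'] := by simp [hq0, e2]
    have hpos : 0 ≤ q := by omega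
    have hsp := find_char_spec l '"' (by omega)
    have m2 := (find_char_neg l '\'').mp e2
    refine ⟨'"', hpos, (List.getElem?_eq_some_iff.mp (hqv ▸ hsp.1)).1, hqv ▸ hsp.1, Or.inl rfl,
      fun i hi x hx => ?_⟩
    rintro (rfl | rfl)
    · exact hsp.2 i (by omega) hx
    · exact m2 (List.mem_of_getElem? hx)
  · by_cases e1 : PySem.Chars.find l ['"'] = -1
    · have hqv : q = PySem.Chars.find l ['\''] := by simp [hq0, e1, e2]
      have hpos : 0 ≤ q := by omega
      have hsp := find_char_spec l '\'' (by omega)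
      have m1 := (find_char_neg l '"').mp e1
      refine ⟨'\'', hpos, (List.getElem?_eq_some_iff.mp (hqv ▸ hsp.1)).1, hqv ▸ hsp.1, Or.inr rfl,
        fun i hi x hx => ?_⟩
      rintro (rfl | rfl)
      · exact m1 (List.mem_of_getElem? hx)
      · exact hsp.2 i (by omega) hx
    · have hsp1 := find_char_spec l '"' (by omega)
      have hsp2 := find_char_spec l '\'' (by omega)
      rcases le_total (PySem.Chars.find l ['"']) (PySem.Chars.find l ['\'']) with hmin | hmin
      · have hqv : q = PySem.Chars.find l ['"'] := by simp [hq0, e1, e2]; omega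
        refine ⟨'"', by omega, (List.getElem?_eq_some_iff.mp (hqv ▸ hsp1.1)).1, hqv ▸ hsp1.1,
          Or.inl rfl, fun i hi x hx => ?_⟩
        rintro (rfl | rfl)
        · exact hsp1.2 i (by omega) hx
        · exact hsp2.2 i (by omega) hx
      · have hqv : q = PySem.Chars.find l ['\''] := by simp [hq0, e1, e2]; omega
        refine ⟨'\'', by omega, (List.getElem?_eq_some_iff.mp (hqv ▸ hsp2.1)).1, hqv ▸ hsp2.1,
          Or.inr rfl, fun i hi x hx => ?_⟩
        rintro (rfl | rfl)
        · exact hsp1.2 i (by omega) hx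
        · exact hsp2.2 i (by omega) hx

-- "idx ≠ -1 and idx < n" ⟺ the pattern occurs starting before n
theorem find_before (l pat : List Char) (n : ℕ) :
    (PySem.Chars.find l pat ≠ -1 ∧ PySem.Chars.find l pat < (n : Int)) ↔
      ∃ j < n, pat <+: l.drop j := by
  have hge := PySem.Chars.neg_one_le_find l pat
  constructor
  · rintro ⟨h1, h2⟩
    have h0 : 0 ≤ PySem.Chars.find l pat := by omega
    exact ⟨(PySem.Chars.find l pat).toNat, by omega,
      (PySem.Chars.find_spec (s := l) (sub := pat) h0).1⟩
  · rintro ⟨j, hj, hjp⟩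
    have hinf : pat <:+: l :=
      List.infix_iff_prefix_suffix.mpr ⟨l.drop j, hjp, List.drop_suffix j l⟩
    have h1 : PySem.Chars.find l pat ≠ -1 := fun he =>
      (PySem.Chars.find_eq_neg_one_iff _ _).mp he hinf
    have h0 : 0 ≤ PySem.Chars.find l pat := by omega
    refine ⟨h1, ?_⟩
    by_contra hlt
    exact (PySem.Chars.find_spec (s := l) (sub := pat) h0).2 j (by omega) hjp

-- scan over a quote-free prefix tests exactly the match positions inside it
theorem scan_free (pat : List Char) (a b : List Char)
    (ha : ∀ x ∈ a, ¬(x = '"' ∨ x = '\'')) :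
    pvScanA pat none (a ++ b)
      = (decide (∃ j < a.length, pat <+: (a ++ b).drop j) || pvScanA pat none b) := by
  induction a with
  | nil => simp
  | cons x a' ih =>
    have hx : ¬(x = '"' ∨ x = '\'') := ha x (by simp)
    have ih' := ih (fun y hy => ha y (by simp [hy]))
    by_cases hp : pat <+: x :: (a' ++ b)
    · have ht : (x :: (a' ++ b)).take pat.length = pat := (List.prefix_iff_eq_take.mp hp).symm
      simp only [List.cons_append, pvScanA, if_neg hx]
      rw [if_pos ⟨trivial, ht⟩]
      have hP : ∃ j < (x :: a').length, pat <+: (x :: (a' ++ b)).drop j :=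
        ⟨0, Nat.succ_pos _, by simpa using hp⟩
      symm
      rw [Bool.or_eq_true]
      exact Or.inl (decide_eq_true hP)
    · have hnt : ¬ ((x :: (a' ++ b)).take pat.length = pat) := fun h =>
        hp (List.prefix_iff_eq_take.mpr h.symm)
      simp only [List.cons_append, pvScanA, if_neg hx]
      rw [if_neg (fun h => hnt h.2), ih']
      have hiff : (∃ j < (x :: a').length, pat <+: (x :: (a' ++ b)).drop j)
           ↔ (∃ j < a'.length, pat <+: (a' ++ b).drop j) := by
        constructor
        · rintro ⟨j, hj, hjp⟩
          match j with
          | 0 => exact absurd (by simpa using hjp) hp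
          | j + 1 => exact ⟨j, by simpa using hj, by simpa using hjp⟩
        · rintro ⟨j, hj, hjp⟩
          exact ⟨j + 1, by simp [hj], by simpa using hjp⟩
      congr 1
      exact decide_eq_decide.mpr hiff.symm

-- inside a quote, everything is skipped until the matching quote char
theorem scan_skip_close (pat : List Char) (qc : Char) (hqc : qc = '"' ∨ qc = '\'')
    (b1 : List Char) (hb1 : qc ∉ b1) (b2 : List Char) :
    pvScanA pat (some qc) (b1 ++ qc :: b2) = pvScanA pat none b2 := by
  induction b1 with
  | nil => simp [pvScanA, hqc]
  | cons x b1' ih =>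
    have hx : x ≠ qc := fun h => hb1 (h ▸ List.mem_cons_self ..)
    have ih' := ih (fun h => hb1 (List.mem_cons_of_mem _ h))
    by_cases hxq : x = '"' ∨ x = '\''
    · simp only [List.cons_append, pvScanA, if_pos hxq]
      rw [if_neg (fun h => hx h.symm)]
      exact ih'
    · simp only [List.cons_append, pvScanA, if_neg hxq]
      rw [if_neg (by simp)]
      exact ih'

theorem scan_skip_all (pat : List Char) (qc : Char) (b : List Char) (hb : qc ∉ b) :
    pvScanA pat (some qc) b = false := by
  induction b with
  | nil => rfl
  | cons x b' ih =>
    have hx : x ≠ qc := fun h => hb (h ▸ List.mem_cons_self ..)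
    have ih' := ih (fun h => hb (List.mem_cons_of_mem _ h))
    by_cases hxq : x = '"' ∨ x = '\''
    · simp only [pvScanA, if_pos hxq]
      rw [if_neg (fun h => hx h.symm)]
      exact ih'
    · simp only [pvScanA, if_neg hxq]
      rw [if_neg (by simp)]
      exact ih'

-- branch lemmas for one round of pvBLoop (qe abstracts B's combined first-quote index)
theorem pvBLoop_qneg (pat l : List Char) (qe : Int)
    (hqe : qe = (if PySem.Chars.find l ['\''] = -1 then PySem.Chars.find l ['"']
                 else if PySem.Chars.find l ['"'] = -1 then PySem.Chars.find l ['\'']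
                 else min (PySem.Chars.find l ['"']) (PySem.Chars.find l ['\''])))
    (hq : qe = -1) :
    pvBLoop pat l = decide (PySem.Chars.find l pat ≠ -1) := by
  rw [pvBLoop, ← hqe, dif_pos hq]

theorem pvBLoop_hit (pat l : List Char) (qe : Int)
    (hqe : qe = (if PySem.Chars.find l ['\''] = -1 then PySem.Chars.find l ['"']
                 else if PySem.Chars.find l ['"'] = -1 then PySem.Chars.find l ['\'']
                 else min (PySem.Chars.find l ['"']) (PySem.Chars.find l ['\''])))
    (hq : ¬ qe = -1)
    (hm : PySem.Chars.find l pat ≠ -1 ∧ PySem.Chars.find l pat < qe) :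
    pvBLoop pat l = true := by
  rw [pvBLoop, ← hqe, dif_neg hq, if_pos hm]

theorem pvBLoop_noclose (pat l : List Char) (qe : Int)
    (hqe : qe = (if PySem.Chars.find l ['\''] = -1 then PySem.Chars.find l ['"']
                 else if PySem.Chars.find l ['"'] = -1 then PySem.Chars.find l ['\'']
                 else min (PySem.Chars.find l ['"']) (PySem.Chars.find l ['\''])))
    (hq : ¬ qe = -1)
    (hm : ¬ (PySem.Chars.find l pat ≠ -1 ∧ PySem.Chars.find l pat < qe))
    (hf : PySem.Chars.findFrom l [(PySem.List.pyGet? l qe).getD ' '] (qe + 1) none = -1) :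
    pvBLoop pat l = false := by
  rw [pvBLoop, ← hqe, dif_neg hq, if_neg hm]
  show (if _ : PySem.Chars.findFrom l [(PySem.List.pyGet? l qe).getD ' '] (qe + 1) none = -1
        then false
        else pvBLoop pat (PySem.List.slice l
          (some (PySem.Chars.findFrom l [(PySem.List.pyGet? l qe).getD ' '] (qe + 1) none + 1))
          none)) = false
  rw [dif_pos hf]

theorem pvBLoop_step (pat l : List Char) (qe : Int)
    (hqe : qe = (if PySem.Chars.find l ['\''] = -1 then PySem.Chars.find l ['"']
                 else if PySem.Chars.find l ['"'] = -1 then PySem.Chars.find l ['\'']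
                 else min (PySem.Chars.find l ['"']) (PySem.Chars.find l ['\''])))
    (hq : ¬ qe = -1)
    (hm : ¬ (PySem.Chars.find l pat ≠ -1 ∧ PySem.Chars.find l pat < qe))
    (hf : ¬ PySem.Chars.findFrom l [(PySem.List.pyGet? l qe).getD ' '] (qe + 1) none = -1) :
    pvBLoop pat l = pvBLoop pat (PySem.List.slice l
      (some (PySem.Chars.findFrom l [(PySem.List.pyGet? l qe).getD ' '] (qe + 1) none + 1))
      none) := by
  rw [pvBLoop, ← hqe, dif_neg hq, if_neg hm]
  show (if _ : PySem.Chars.findFrom l [(PySem.List.pyGet? l qe).getD ' '] (qe + 1) none = -1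
        then false
        else pvBLoop pat (PySem.List.slice l
          (some (PySem.Chars.findFrom l [(PySem.List.pyGet? l qe).getD ' '] (qe + 1) none + 1))
          none)) = _
  rw [dif_neg hf]

-- main equivalence, by induction on a length bound
theorem scan_eq_loop (pat : List Char) (hp : pat ≠ []) :
    ∀ (fuel : ℕ) (l : List Char), l.length ≤ fuel → pvScanA pat none l = pvBLoop pat l := by
  intro fuel
  induction fuel with
  | zero =>
    intro l hl
    have hnil : l = [] := List.eq_nil_of_length_eq_zero (Nat.le_zero.mp hl)
    subst hnil
    have h2 : PySem.Chars.find ([] : List Char) ['\''] = -1 := by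
      rw [PySem.Chars.find_eq_neg_one_iff]; simp
    have h3 : PySem.Chars.find ([] : List Char) pat = -1 := by
      rw [PySem.Chars.find_eq_neg_one_iff]
      intro h; exact hp (List.eq_nil_of_sublist_nil h.sublist)
    rw [pvBLoop_qneg pat [] _ rfl (by rw [if_pos h2]; rw [PySem.Chars.find_eq_neg_one_iff]; simp)]
    simp [pvScanA, h3]
  | succ f ih =>
    intro l hl
    by_cases hq : (if PySem.Chars.find l ['\''] = -1 then PySem.Chars.find l ['"']
                   else if PySem.Chars.find l ['"'] = -1 then PySem.Chars.find l ['\'']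
                   else min (PySem.Chars.find l ['"']) (PySem.Chars.find l ['\''])) = -1
    · rw [pvBLoop_qneg pat l _ rfl hq]
      have hfree := combined_neg l hq
      have hsf := scan_free pat l [] hfree
      rw [List.append_nil] at hsf
      rw [hsf]
      have hnil : pvScanA pat none ([] : List Char) = false := rfl
      rw [hnil, Bool.or_false]
      refine decide_eq_decide.mpr ?_
      constructor
      · rintro ⟨j, hj, hjp⟩ he
        exact (PySem.Chars.find_eq_neg_one_iff _ _).mp he
          (List.infix_iff_prefix_suffix.mpr ⟨l.drop j, hjp, List.drop_suffix j l⟩)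
      · intro h1
        have hge := PySem.Chars.neg_one_le_find l pat
        have h0 : 0 ≤ PySem.Chars.find l pat := by omega
        have hpre := (PySem.Chars.find_spec (s := l) (sub := pat) h0).1
        have hjlt : (PySem.Chars.find l pat).toNat < l.length := by
          by_contra hge'
          rw [List.drop_eq_nil_of_le (by omega)] at hpre
          exact hp (List.prefix_nil.mp hpre)
        exact ⟨(PySem.Chars.find l pat).toNat, hjlt, hpre⟩
    · obtain ⟨c, hq0, hlen, hget, hcq, hmin⟩ := first_quote_spec l _ rfl hq
      set qe : Int := (if PySem.Chars.find l ['\''] = -1 then PySem.Chars.find l ['"']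
                       else if PySem.Chars.find l ['"'] = -1 then PySem.Chars.find l ['\'']
                       else min (PySem.Chars.find l ['"']) (PySem.Chars.find l ['\''])) with hqe
      set n : ℕ := qe.toNat with hn
      have hcastn : (n : Int) = qe := Int.toNat_of_nonneg hq0
      have hci : l[n] = c := (List.getElem?_eq_some_iff.mp hget).2
      have hdecomp : l = l.take n ++ c :: l.drop (n + 1) := by
        conv_lhs => rw [← List.take_append_drop n l]
        rw [List.drop_eq_getElem_cons hlen, hci]
      have hal : (l.take n).length = n := by
        rw [List.length_take]; omega
      have hafree : ∀ x ∈ l.take n, ¬(x = '"' ∨ x = '\'') := by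
        intro x hx
        obtain ⟨i, hi, hix⟩ := List.mem_iff_getElem.mp hx
        have hin : i < n := by omega
        refine hmin i hin x ?_
        rw [← hix, List.getElem_take]
        exact List.getElem?_eq_getElem (by omega)
      -- A's scan over the quote-free prefix, then entering the quote
      have hA : pvScanA pat none l
          = (decide (∃ j < n, pat <+: l.drop j) || pvScanA pat (some c) (l.drop (n + 1))) := by
        conv_lhs => rw [hdecomp]
        rw [scan_free pat (l.take n) (c :: l.drop (n + 1)) hafree, ← hdecomp, hal]
        congr 1
        simp only [pvScanA, if_pos hcq]
      by_cases hm : (PySem.Chars.find l pat ≠ -1 ∧ PySem.Chars.find l pat < qe)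
      · rw [pvBLoop_hit pat l qe hqe hq hm, hA]
        have : ∃ j < n, pat <+: l.drop j :=
          (find_before l pat n).mp ⟨hm.1, by rw [hcastn]; exact hm.2⟩
        rw [decide_eq_true this, Bool.true_or]
      · have hnomatch : ¬ ∃ j < n, pat <+: l.drop j := fun h => by
          obtain ⟨h1, h2⟩ := (find_before l pat n).mpr h
          exact hm ⟨h1, by rw [← hcastn]; exact h2⟩
        have hAd : pvScanA pat none l = pvScanA pat (some c) (l.drop (n + 1)) := by
          rw [hA, decide_eq_false hnomatch, Bool.false_or]
        have hqc : (PySem.List.pyGet? l qe).getD ' ' = c := by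
          rw [← hcastn, PySem.List.pyGet?_natCast, hget]; rfl
        have hle1 : n + 1 ≤ l.length := by omega
        have hcast1 : qe + 1 = ((n + 1 : ℕ) : Int) := by omega
        have hFF : PySem.Chars.findFrom l [(PySem.List.pyGet? l qe).getD ' '] (qe + 1) none
            = (if PySem.Chars.find (l.drop (n + 1)) [c] = -1 then -1
               else ((n + 1 : ℕ) : Int) + PySem.Chars.find (l.drop (n + 1)) [c]) := by
          rw [hqc, hcast1, PySem.Chars.findFrom_natCast _ _ _ hle1]
        by_cases hf : PySem.Chars.find (l.drop (n + 1)) [c] = -1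
        · rw [pvBLoop_noclose pat l qe hqe hq hm (by rw [hFF, if_pos hf]), hAd]
          exact scan_skip_all pat c _ ((find_char_neg _ c).mp hf)
        · have hge := PySem.Chars.neg_one_le_find (l.drop (n + 1)) [c]
          have hf0 : 0 ≤ PySem.Chars.find (l.drop (n + 1)) [c] := by omega
          set b : List Char := l.drop (n + 1) with hb
          set m : ℕ := (PySem.Chars.find b [c]).toNat with hm0
          have hcastm : (m : Int) = PySem.Chars.find b [c] := Int.toNat_of_nonneg hf0
          obtain ⟨hbc, hbmin⟩ := find_char_spec b c hf0
          have hmlen : m < b.length := (List.getElem?_eq_some_iff.mp hbc).1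
          have hbci : b[m] = c := (List.getElem?_eq_some_iff.mp hbc).2
          have hbdecomp : b = b.take m ++ c :: b.drop (m + 1) := by
            conv_lhs => rw [← List.take_append_drop m b]
            rw [List.drop_eq_getElem_cons hmlen, hbci]
          have hnb1 : c ∉ b.take m := by
            intro hxc
            obtain ⟨i, hi, hix⟩ := List.mem_iff_getElem.mp hxc
            have hin : i < m := by rw [List.length_take] at hi; omega
            refine hbmin i hin ?_
            rw [← hix, List.getElem_take]
            exact List.getElem?_eq_getElem (by omega)
          have hAskip : pvScanA pat (some c) b = pvScanA pat none (b.drop (m + 1)) := by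
            conv_lhs => rw [hbdecomp]
            exact scan_skip_close pat c hcq (b.take m) hnb1 (b.drop (m + 1))
          have hkval : PySem.Chars.findFrom l [(PySem.List.pyGet? l qe).getD ' '] (qe + 1) none
              = ((n + 1 : ℕ) : Int) + PySem.Chars.find b [c] := by
            rw [hFF, if_neg hf]
          have hkne : ¬ PySem.Chars.findFrom l [(PySem.List.pyGet? l qe).getD ' '] (qe + 1) none = -1 := by
            rw [hkval]; omega
          rw [pvBLoop_step pat l qe hqe hq hm hkne, hkval]
          have hslice : PySem.List.slice l (some (((n + 1 : ℕ) : Int) + PySem.Chars.find b [c] + 1)) none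
              = b.drop (m + 1) := by
            rw [PySem.List.slice_from _ (by omega)]
            have : (((n + 1 : ℕ) : Int) + PySem.Chars.find b [c] + 1).toNat = (m + 1) + (n + 1) := by omega
            rw [this, hb, List.drop_drop]
            congr 1
            omega
          rw [hslice, hAd, hAskip]
          refine ih (b.drop (m + 1)) ?_
          have hbl : b.length = l.length - (n + 1) := by rw [hb, List.length_drop]
          have : (b.drop (m + 1)).length = b.length - (m + 1) := List.length_drop ..
          omega

-- ===== VERDICT =====
theorem is_safe_to_split_spec : Claim_equal_is_safe_to_split := by
  intro expr logical_op _
  unfold Spec_is_safe_to_split is_safe_to_split is_safe_to_split_alt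
  exact scan_eq_loop _ (by simp) expr.toList.length expr.toList le_rfl
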